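-- pv_equiv track=rewrite | github.com/HanKyeon/TIL-Today-I-Learned | BAEKJOON/13549dij.py | dij
-- ===== SOURCE A (Python) =====
-- from heapq import heappop, heappush
--
-- def dij(sta, end):
--     dst = [int(10e9)] * (end*2+1)
--     dst[sta] = 0
--     heap = []
--     heappush(heap, (0, sta))
--     while heap:
--         sumc, now = heappop(heap)
--         if dst[now] < sumc:
--             continue
--         a = now*2
--         while a != 0 and a <= end*2:
--             if dst[a] > sumc:
--                 dst[a] = sumc
--                 heappush(heap, (sumc, a))
--             a *= 2
--         if 0<=now+1<=end*2 and dst[now+1] > sumc + 1: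
--             dst[now+1] = sumc + 1
--             heappush(heap, (sumc+1, now+1))
--         if 0<=now-1<=end*2 and dst[now-1] > sumc + 1:
--             dst[now-1] = sumc + 1
--             heappush(heap, (sumc+1, now-1))
--     return dst[end]
-- ===== SOURCE B (Python) =====
-- def dij(sta, end):
--     # 0-1 BFS: a two-stack deque replaces the binary heap (0-cost moves go to
--     # the front, 1-cost moves to the back).
--     limit = end * 2
--     dst = [int(10e9)] * (limit + 1)
--     dst[sta] = 0
--     front = []            # front half of the deque, top of stack = next to pop
--     back = [(0, sta)]     # back half, oldest first
--     while front or back: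
--         if not front:
--             front = back[::-1]
--             back = []
--         sumc, now = front.pop()
--         if dst[now] < sumc:
--             continue
--         a = now * 2
--         while a != 0 and a <= limit:
--             if dst[a] > sumc:
--                 dst[a] = sumc
--                 front.append((sumc, a))   # cost 0: push to the front
--             a *= 2
--         for b in (now + 1, now - 1):
--             if 0 <= b <= limit and dst[b] > sumc + 1:
--                 dst[b] = sumc + 1
--                 back.append((sumc + 1, b))  # cost 1: push to the back
--     return dst[end]
-- ===== Notes on version B (the rewrite author's own statement) =====
-- stated objective: alternative
-- what changed: Replaces lazy Dijkstra's binary heap with a 0-1 BFS two-stack deque (0-cost doubling moves pushed to the front, 1-cost steps to the back); intended as faster (O(V+E) vs O(E log V)) but a timing run read only ~1.5x at the largest size, so no speed is claimed.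
import Mathlib
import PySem

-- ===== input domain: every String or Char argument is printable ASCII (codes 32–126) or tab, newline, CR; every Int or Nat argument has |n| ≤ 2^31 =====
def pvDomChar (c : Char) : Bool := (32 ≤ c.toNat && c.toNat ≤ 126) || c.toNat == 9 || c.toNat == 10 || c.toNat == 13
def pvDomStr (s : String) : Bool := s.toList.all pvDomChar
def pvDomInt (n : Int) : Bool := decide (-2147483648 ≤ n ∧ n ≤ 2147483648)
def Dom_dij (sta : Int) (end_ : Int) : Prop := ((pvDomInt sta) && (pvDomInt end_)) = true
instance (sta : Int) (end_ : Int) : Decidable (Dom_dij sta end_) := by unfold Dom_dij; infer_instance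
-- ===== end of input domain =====

-- B replaces A's lazy-Dijkstra binary heap with a 0-1-BFS two-stack deque (objective:
-- alternative algorithm; no speed claim). Proof: both loops are label-correcting schemes whose
-- final array is the greatest stable distance array, hence they agree independently of pop order.


-- ===== PORT A =====
-- heapq is ported by its observable behaviour: the heap list is kept sorted (lexicographic
-- tuple order), heappush = ordered insert, heappop = head (the minimum; equal tuples are
-- identical values, so this is exact for heapq).
def heapPush (x : Int × Int) : List (Int × Int) → List (Int × Int)
  | [] => [x]
  | y :: ys => if x.1 < y.1 ∨ (x.1 = y.1 ∧ x.2 ≤ y.2) then x :: y :: ys else y :: heapPush x ys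

-- the inner doubling loop 'while a != 0 and a <= end*2'; the fuel guard only makes the
-- recursion total (inside Pre_ at most 34 doublings happen; Python raises outside Pre_)
def relaxA (limit sumc : Int) : Nat → Int → List Int → List (Int × Int) → List Int × List (Int × Int)
  | 0, _, dst, ps => (dst, ps)
  | fuel+1, a, dst, ps =>
    if a ≠ 0 ∧ a ≤ limit then
      if PySem.List.pyGetD dst a 0 > sumc then
        relaxA limit sumc fuel (a * 2) (PySem.List.pySetD dst a sumc) (ps ++ [(sumc, a)])
      else
        relaxA limit sumc fuel (a * 2) dst ps
    else (dst, ps)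

-- the outer 'while heap' loop; fuel is a decreasing-measure bound, the 0 case is unreachable
def loopA (limit : Int) : Nat → List Int → List (Int × Int) → List Int
  | 0, dst, _ => dst
  | _+1, dst, [] => dst
  | fuel+1, dst, (sumc, now) :: rest =>
    if PySem.List.pyGetD dst now 0 < sumc then loopA limit fuel dst rest
    else
      let r1 := relaxA limit sumc 128 (now * 2) dst []
      let r2 := if 0 ≤ now + 1 ∧ now + 1 ≤ limit ∧ PySem.List.pyGetD r1.1 (now + 1) 0 > sumc + 1
                then (PySem.List.pySetD r1.1 (now + 1) (sumc + 1), r1.2 ++ [(sumc + 1, now + 1)])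
                else r1
      let r3 := if 0 ≤ now - 1 ∧ now - 1 ≤ limit ∧ PySem.List.pyGetD r2.1 (now - 1) 0 > sumc + 1
                then (PySem.List.pySetD r2.1 (now - 1) (sumc + 1), r2.2 ++ [(sumc + 1, now - 1)])
                else r2
      loopA limit fuel r3.1 (r3.2.foldl (fun h p => heapPush p h) rest)

def dij (sta : Int) (end_ : Int) : Int :=
  let limit := end_ * 2
  let dst0 := List.replicate (limit + 1).toNat (10000000000 : Int)
  let dst1 := PySem.List.pySetD dst0 sta 0
  let fuel := (2 * 10000000000 * (limit + 1) + 1).toNat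
  PySem.List.pyGetD (loopA limit fuel dst1 [(0, sta)]) end_ 0

-- ===== PORT B =====
-- Source B's inner doubling loop: Source B pushes 0-cost pairs straight onto the deque front,
-- so this port threads the front list itself (head = next to pop)
def relaxB (limit sumc : Int) : Nat → Int → List Int → List (Int × Int) → List Int × List (Int × Int)
  | 0, _, dst, front => (dst, front)
  | fuel+1, a, dst, front =>
    if a ≠ 0 ∧ a ≤ limit then
      if PySem.List.pyGetD dst a 0 > sumc then
        relaxB limit sumc fuel (a * 2) (PySem.List.pySetD dst a sumc) ((sumc, a) :: front)
      else
        relaxB limit sumc fuel (a * 2) dst front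
    else (dst, front)

-- Source B's 'while front or back' loop over the two-stack deque; Python's front list is kept
-- reversed here (Lean head = Python front[-1]), so 'front = back[::-1]' becomes 'front := back'
def loopB (limit : Int) : Nat → List Int → List (Int × Int) → List (Int × Int) → List Int
  | 0, dst, _, _ => dst
  | fuel+1, dst, front, back =>
    match (if front.isEmpty then (back, ([] : List (Int × Int))) else (front, back)) with
    | ([], _) => dst
    | ((sumc, now) :: fs, bk) =>
      if PySem.List.pyGetD dst now 0 < sumc then loopB limit fuel dst fs bk
      else
        let r1 := relaxB limit sumc 128 (now * 2) dst fs
        let r2 := [now + 1, now - 1].foldl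
            (fun (st : List Int × List (Int × Int)) b =>
              if 0 ≤ b ∧ b ≤ limit ∧ PySem.List.pyGetD st.1 b 0 > sumc + 1
              then (PySem.List.pySetD st.1 b (sumc + 1), st.2 ++ [(sumc + 1, b)])
              else st) (r1.1, [])
        loopB limit fuel r2.1 r1.2 (bk ++ r2.2)

def dij_alt (sta : Int) (end_ : Int) : Int :=
  let limit := end_ * 2
  let dst0 := List.replicate (limit + 1).toNat (10000000000 : Int)
  let dst1 := PySem.List.pySetD dst0 sta 0
  let fuel := (2 * 10000000000 * (limit + 1) + 1).toNat
  PySem.List.pyGetD (loopB limit fuel dst1 [] [(0, sta)]) end_ 0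

-- ===== PRECONDITION & SPEC =====
-- Python A raises IndexError exactly when sta lies outside the board [0, 2*end]
-- (negative sta wraps at first but the doubling loop always runs off the list).
def Pre_dij (sta : Int) (end_ : Int) : Prop := 0 ≤ sta ∧ sta ≤ 2 * end_
instance (sta : Int) (end_ : Int) : Decidable (Pre_dij sta end_) := by unfold Pre_dij; infer_instance
def pvWitness_dij : Int × Int := (1, 2)

def Spec_dij (sta : Int) (end_ : Int) (out : Int) : Prop := out = dij_alt sta end_
instance (sta : Int) (end_ : Int) (out : Int) : Decidable (Spec_dij sta end_ out) := by unfold Spec_dij; infer_instance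

-- ===== CLAIM (what is proved, stated in full; the proofs are below) =====
def Claim_equal_dij : Prop := ∀ (sta : Int) (end_ : Int), Dom_dij sta end_ → Pre_dij sta end_ → Spec_dij sta end_ (dij sta end_)

-- ===== LEMMAS AND PROOFS =====

def pvVal (dst : List Int) (i : Int) : Int := PySem.List.pyGetD dst i 0
def pvSum (l : List Int) : Nat := (l.map Int.toNat).sum

theorem pvVal_eq_getD (dst : List Int) (i : Int) (h : 0 ≤ i) :
    pvVal dst i = dst.getD i.toNat 0 := by
  conv_lhs => rw [show i = ((i.toNat : Nat) : Int) from (Int.toNat_of_nonneg h).symm]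
  rw [pvVal, PySem.List.pyGetD_natCast]

theorem pvVal_set_self (dst : List Int) (a v : Int) (h0 : 0 ≤ a) (h1 : a < (dst.length : Int)) :
    pvVal (PySem.List.pySetD dst a v) a = v := by
  rw [PySem.List.pySetD_of_nonneg _ _ h0, pvVal_eq_getD _ _ h0]
  have hlt : a.toNat < dst.length := by omega
  simp [List.getD, hlt]

theorem pvVal_set_other (dst : List Int) (a v i : Int) (h0 : 0 ≤ i) (ha : 0 ≤ a) (hne : i ≠ a) :
    pvVal (PySem.List.pySetD dst a v) i = pvVal dst i := by
  rw [PySem.List.pySetD_of_nonneg _ _ ha, pvVal_eq_getD _ _ h0, pvVal_eq_getD _ _ h0]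
  have : i.toNat ≠ a.toNat := by omega
  simp [List.getD, List.getElem?_set_ne (by omega : a.toNat ≠ i.toNat)]

theorem pvSum_set_aux (l : List Int) : ∀ (n : Nat) (v : Int), n < l.length →
    pvSum (l.set n v) + (l.getD n 0).toNat = pvSum l + v.toNat := by
  induction l with
  | nil => intro n v h; simp at h
  | cons x xs ih =>
    intro n v h
    cases n with
    | zero => simp [pvSum, List.set]; omega
    | succ m =>
      have := ih m v (by simpa using h)
      simp [pvSum, List.set] at this ⊢
      omega

theorem pvSum_set (dst : List Int) (a v : Int) (h0 : 0 ≤ a) (h1 : a < (dst.length : Int))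
    (hv : 0 ≤ v) (hlt : v < pvVal dst a) :
    pvSum (PySem.List.pySetD dst a v) + 1 ≤ pvSum dst := by
  rw [PySem.List.pySetD_of_nonneg _ _ h0]
  have h := pvSum_set_aux dst a.toNat v (by omega)
  rw [pvVal_eq_getD _ _ h0] at hlt
  omega

theorem relaxA_spec (limit c : Int) (hc : 0 ≤ c) :
    ∀ (fuel : Nat) (a : Int) (dst : List Int) (ps : List (Int × Int)),
    0 ≤ a →
    (∀ i, 0 ≤ i → i ≤ limit → 0 ≤ pvVal dst i) →
    dst.length = (limit + 1).toNat →
    (relaxA limit c fuel a dst ps).1.length = dst.length ∧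
    (∀ i, 0 ≤ i → i ≤ limit → pvVal (relaxA limit c fuel a dst ps).1 i ≤ pvVal dst i) ∧
    (∀ i, 0 ≤ i → i < a → pvVal (relaxA limit c fuel a dst ps).1 i = pvVal dst i) ∧
    (∀ i, 0 ≤ i → i ≤ limit → 0 ≤ pvVal (relaxA limit c fuel a dst ps).1 i) ∧
    (∀ x ∈ ps, x ∈ (relaxA limit c fuel a dst ps).2) ∧
    (∀ p ∈ (relaxA limit c fuel a dst ps).2, p ∈ ps ∨
      (1 ≤ p.2 ∧ p.2 ≤ limit ∧ p.1 = c ∧ pvVal (relaxA limit c fuel a dst ps).1 p.2 ≤ p.1)) ∧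
    (∀ u, 0 ≤ u → u ≤ limit → pvVal (relaxA limit c fuel a dst ps).1 u ≠ pvVal dst u →
      (pvVal (relaxA limit c fuel a dst ps).1 u, u) ∈ (relaxA limit c fuel a dst ps).2) ∧
    (pvSum (relaxA limit c fuel a dst ps).1 + (relaxA limit c fuel a dst ps).2.length ≤
      pvSum dst + ps.length) := by
  intro fuel
  induction fuel with
  | zero =>
    intro a dst ps _ hnn _
    exact ⟨rfl, fun i _ _ => le_refl _, fun i _ _ => rfl, hnn, fun x hx => hx,
      fun p hp => Or.inl hp, fun u _ _ hch => absurd rfl hch, by simp [relaxA]⟩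
  | succ n ih =>
    intro a dst ps ha hnn hlen
    by_cases hcond : a ≠ 0 ∧ a ≤ limit
    · have ha1 : 1 ≤ a := by omega
      have hlenI : (dst.length : Int) = limit + 1 := by omega
      have harange : a < (dst.length : Int) := by omega
      by_cases hgt : PySem.List.pyGetD dst a 0 > c
      · -- write branch
        have hgt' : c < pvVal dst a := hgt
        have heq : relaxA limit c (n+1) a dst ps =
            relaxA limit c n (a*2) (PySem.List.pySetD dst a c) (ps ++ [(c, a)]) := by
          simp [relaxA, hcond, hgt]
        set dstm := PySem.List.pySetD dst a c with hdstm
        have hvs : pvVal dstm a = c := pvVal_set_self dst a c (by omega) harange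
        have hvo : ∀ i, 0 ≤ i → i ≠ a → pvVal dstm i = pvVal dst i := fun i h0 hne =>
          pvVal_set_other dst a c i h0 (by omega) hne
        have hlenm : dstm.length = (limit + 1).toNat := by
          rw [hdstm, PySem.List.length_pySetD]; exact hlen
        have hnnm : ∀ i, 0 ≤ i → i ≤ limit → 0 ≤ pvVal dstm i := by
          intro i h0 h1
          by_cases hia : i = a
          · rw [hia, hvs]; exact hc
          · rw [hvo i h0 hia]; exact hnn i h0 h1
        obtain ⟨I1, I2, I3, I4, I5, I6, I7, I8⟩ := ih (a*2) dstm (ps ++ [(c, a)]) (by omega) hnnm hlenm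
        rw [heq]
        refine ⟨?_, ?_, ?_, I4, ?_, ?_, ?_, ?_⟩
        · rw [I1, hdstm, PySem.List.length_pySetD]
        · intro i h0 h1
          refine (I2 i h0 h1).trans ?_
          by_cases hia : i = a
          · rw [hia, hvs]; omega
          · rw [hvo i h0 hia]
        · intro i h0 h1
          rw [I3 i h0 (by omega), hvo i h0 (by omega)]
        · intro x hx; exact I5 x (by simp [hx])
        · intro p hp
          rcases I6 p hp with hmem | hprop
          · rcases List.mem_append.mp hmem with h | h
            · exact Or.inl h
            · have hp2 : p = (c, a) := by simpa using h
              subst hp2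
              refine Or.inr ⟨by omega, by omega, rfl, ?_⟩
              have h2 := I2 a (by omega) (by omega)
              rw [hvs] at h2
              simpa using h2
          · exact Or.inr hprop
        · intro u h0 h1 hch
          by_cases hm : pvVal (relaxA limit c n (a*2) dstm (ps ++ [(c, a)])).1 u = pvVal dstm u
          · have hua : u = a := by
              by_contra hua
              exact hch (hm.trans (hvo u h0 hua))
            subst hua
            rw [hm, hvs]
            exact I5 (c, u) (by simp)
          · exact I7 u h0 h1 hm
        · have hsum := pvSum_set dst a c (by omega) harange hc hgt'
          rw [← hdstm] at hsum
          have hg : (ps ++ [(c, a)]).length = ps.length + 1 := by simp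
          omega
      · -- no-write branch
        have heq : relaxA limit c (n+1) a dst ps = relaxA limit c n (a*2) dst ps := by
          simp [relaxA, hcond, hgt]
        obtain ⟨I1, I2, I3, I4, I5, I6, I7, I8⟩ := ih (a*2) dst ps (by omega) hnn hlen
        rw [heq]
        exact ⟨I1, I2, fun i h0 h1 => I3 i h0 (by omega), I4, I5, I6, I7, I8⟩
    · have heq : relaxA limit c (n+1) a dst ps = (dst, ps) := by
        simp only [relaxA, if_neg hcond]
      rw [heq]
      exact ⟨rfl, fun i _ _ => le_refl _, fun i _ _ => rfl, hnn, fun x hx => hx,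
        fun p hp => Or.inl hp, fun u _ _ hch => absurd rfl hch, le_refl _⟩

def pvEdgesOK (limit : Int) (f : Int → Int) (u : Int) : Prop :=
  (u ≠ 0 → 2 * u ≤ limit → f (2 * u) ≤ f u) ∧
  (u + 1 ≤ limit → f (u + 1) ≤ f u + 1) ∧
  (1 ≤ u → f (u - 1) ≤ f u + 1)

def pvStable (limit : Int) (f : Int → Int) : Prop :=
  ∀ u, 0 ≤ u → u ≤ limit → pvEdgesOK limit f u

theorem relaxA_lower (limit c : Int) (f : Int → Int) (hst : pvStable limit f) :
    ∀ (fuel : Nat) (a : Int) (dst : List Int) (ps : List (Int × Int)),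
    0 ≤ a →
    dst.length = (limit + 1).toNat →
    (∀ i, 0 ≤ i → i ≤ limit → f i ≤ pvVal dst i) →
    (1 ≤ a → a ≤ limit → f a ≤ c) →
    ∀ i, 0 ≤ i → i ≤ limit → f i ≤ pvVal (relaxA limit c fuel a dst ps).1 i := by
  intro fuel
  induction fuel with
  | zero => intro a dst ps _ _ hf _ i h0 h1; exact hf i h0 h1
  | succ n ih =>
    intro a dst ps ha hlen hf hfa
    by_cases hcond : a ≠ 0 ∧ a ≤ limit
    · have ha1 : 1 ≤ a := by omega
      have hfa' : f a ≤ c := hfa ha1 hcond.2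
      have hnext : 1 ≤ a * 2 → a * 2 ≤ limit → f (a * 2) ≤ c := by
        intro _ h2
        have := (hst a (by omega) hcond.2).1 hcond.1 (by omega)
        calc f (a * 2) = f (2 * a) := by ring_nf
          _ ≤ f a := this
          _ ≤ c := hfa'
      by_cases hgt : PySem.List.pyGetD dst a 0 > c
      · have heq : relaxA limit c (n+1) a dst ps =
            relaxA limit c n (a*2) (PySem.List.pySetD dst a c) (ps ++ [(c, a)]) := by
          simp [relaxA, hcond, hgt]
        rw [heq]
        refine ih (a*2) _ _ (by omega) (by rw [PySem.List.length_pySetD]; exact hlen) ?_ hnext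
        intro i h0 h1
        by_cases hia : i = a
        · rw [hia, pvVal_set_self dst a c (by omega) (by omega)]
          exact hfa'
        · rw [pvVal_set_other dst a c i h0 (by omega) hia]
          exact hf i h0 h1
      · have heq : relaxA limit c (n+1) a dst ps = relaxA limit c n (a*2) dst ps := by
          simp [relaxA, hcond, hgt]
        rw [heq]
        exact ih (a*2) dst ps (by omega) hlen hf hnext
    · have heq : relaxA limit c (n+1) a dst ps = (dst, ps) := by
        simp only [relaxA, if_neg hcond]
      rw [heq]
      exact hf

theorem relaxA_first (limit c : Int) (hc : 0 ≤ c) (fuel : Nat) (a : Int)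
    (dst : List Int) (ps : List (Int × Int))
    (h1 : 1 ≤ a) (h2 : a ≤ limit)
    (hnn : ∀ i, 0 ≤ i → i ≤ limit → 0 ≤ pvVal dst i)
    (hlen : dst.length = (limit + 1).toNat) :
    pvVal (relaxA limit c (fuel+1) a dst ps).1 a ≤ c := by
  have hcond : a ≠ 0 ∧ a ≤ limit := ⟨by omega, h2⟩
  by_cases hgt : PySem.List.pyGetD dst a 0 > c
  · have heq : relaxA limit c (fuel+1) a dst ps =
        relaxA limit c fuel (a*2) (PySem.List.pySetD dst a c) (ps ++ [(c, a)]) := by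
      simp [relaxA, hcond, hgt]
    rw [heq]
    have hlenm : (PySem.List.pySetD dst a c).length = (limit + 1).toNat := by
      rw [PySem.List.length_pySetD]; exact hlen
    have hnnm : ∀ i, 0 ≤ i → i ≤ limit → 0 ≤ pvVal (PySem.List.pySetD dst a c) i := by
      intro i h0 hle
      by_cases hia : i = a
      · rw [hia, pvVal_set_self dst a c (by omega) (by omega)]; exact hc
      · rw [pvVal_set_other dst a c i h0 (by omega) hia]; exact hnn i h0 hle
    have h := (relaxA_spec limit c hc fuel (a*2) (PySem.List.pySetD dst a c) (ps ++ [(c, a)])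
      (by omega) hnnm hlenm).2.1 a (by omega) h2
    rw [pvVal_set_self dst a c (by omega) (by omega)] at h
    exact h
  · have heq : relaxA limit c (fuel+1) a dst ps = relaxA limit c fuel (a*2) dst ps := by
      simp [relaxA, hcond, hgt]
    rw [heq]
    have h := (relaxA_spec limit c hc fuel (a*2) dst ps (by omega) hnn hlen).2.1 a (by omega) h2
    have hle : pvVal dst a ≤ c := le_of_not_gt hgt
    exact h.trans hle

def nbr (limit c2 b : Int) (st : List Int × List (Int × Int)) : List Int × List (Int × Int) :=
  if 0 ≤ b ∧ b ≤ limit ∧ PySem.List.pyGetD st.1 b 0 > c2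
  then (PySem.List.pySetD st.1 b c2, st.2 ++ [(c2, b)])
  else st

theorem nbr_spec (limit c2 b : Int) (st : List Int × List (Int × Int))
    (hc2 : 0 ≤ c2) (hlen : st.1.length = (limit + 1).toNat) :
    (nbr limit c2 b st).1.length = st.1.length ∧
    (∀ i, 0 ≤ i → i ≤ limit → pvVal (nbr limit c2 b st).1 i ≤ pvVal st.1 i) ∧
    (∀ i, 0 ≤ i → i ≠ b → pvVal (nbr limit c2 b st).1 i = pvVal st.1 i) ∧
    (0 ≤ b → b ≤ limit → pvVal (nbr limit c2 b st).1 b ≤ c2) ∧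
    (∀ x ∈ st.2, x ∈ (nbr limit c2 b st).2) ∧
    (∀ p ∈ (nbr limit c2 b st).2, p ∈ st.2 ∨
      (p = (c2, b) ∧ 0 ≤ b ∧ b ≤ limit ∧ pvVal (nbr limit c2 b st).1 b = c2)) ∧
    (∀ u, 0 ≤ u → pvVal (nbr limit c2 b st).1 u ≠ pvVal st.1 u →
      (pvVal (nbr limit c2 b st).1 u, u) ∈ (nbr limit c2 b st).2) ∧
    (pvSum (nbr limit c2 b st).1 + (nbr limit c2 b st).2.length ≤ pvSum st.1 + st.2.length) ∧
    (∀ i, 0 ≤ i → i ≤ limit → 0 ≤ pvVal st.1 i → 0 ≤ pvVal (nbr limit c2 b st).1 i) ∧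
    (∀ f' : Int → Int, (∀ i, 0 ≤ i → i ≤ limit → f' i ≤ pvVal st.1 i) → (0 ≤ b → b ≤ limit → f' b ≤ c2) →
      ∀ i, 0 ≤ i → i ≤ limit → f' i ≤ pvVal (nbr limit c2 b st).1 i) := by
  by_cases hcond : 0 ≤ b ∧ b ≤ limit ∧ PySem.List.pyGetD st.1 b 0 > c2
  · have heq : nbr limit c2 b st = (PySem.List.pySetD st.1 b c2, st.2 ++ [(c2, b)]) := by
      simp [nbr, hcond]
    obtain ⟨hb0, hb1, hbgt⟩ := hcond
    have hbgt' : c2 < pvVal st.1 b := hbgt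
    have hrange : b < (st.1.length : Int) := by omega
    have hself := pvVal_set_self st.1 b c2 hb0 hrange
    have hother := fun i h0 hne => pvVal_set_other st.1 b c2 i h0 hb0 hne
    rw [heq]
    refine ⟨PySem.List.length_pySetD .., ?_, ?_, ?_, ?_, ?_, ?_, ?_, ?_, ?_⟩
    · intro i h0 h1
      by_cases hib : i = b
      · rw [hib, hself]; omega
      · rw [hother i h0 hib]
    · intro i h0 hib; exact hother i h0 hib
    · intro _ _; rw [hself]
    · intro x hx; simp [hx]
    · intro p hp
      rcases List.mem_append.mp hp with h | h
      · exact Or.inl h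
      · refine Or.inr ⟨by simpa using h, hb0, hb1, hself⟩
    · intro u h0 hch
      by_cases hub : u = b
      · subst hub; rw [hself]; simp
      · exact absurd (hother u h0 hub) hch
    · have hsum := pvSum_set st.1 b c2 hb0 hrange hc2 hbgt'
      simp only [List.length_append, List.length_cons, List.length_nil]
      omega
    · intro i h0 h1 hnn
      by_cases hib : i = b
      · rw [hib, hself]; exact hc2
      · rw [hother i h0 hib]; exact hnn
    · intro f' hf' hfb i h0 h1
      by_cases hib : i = b
      · rw [hib, hself]; exact hfb hb0 hb1
      · rw [hother i h0 hib]; exact hf' i h0 h1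
  · have heq : nbr limit c2 b st = st := by simp [nbr, hcond]
    rw [heq]
    refine ⟨rfl, fun i _ _ => le_refl _, fun i _ _ => rfl, ?_, fun x hx => hx,
      fun p hp => Or.inl hp, fun u _ hch => absurd rfl hch, le_refl _, fun i _ _ h => h,
      fun f' hf' _ i h0 h1 => hf' i h0 h1⟩
    intro hb0 hb1
    have : ¬ PySem.List.pyGetD st.1 b 0 > c2 := fun h => hcond ⟨hb0, hb1, h⟩
    exact le_of_not_gt this

theorem relaxA_zero (limit c : Int) (fuel : Nat) (dst : List Int) (ps : List (Int × Int)) :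
    relaxA limit c fuel 0 dst ps = (dst, ps) := by
  cases fuel <;> simp [relaxA]

def stepA (limit c now : Int) (dst : List Int) : List Int × List (Int × Int) × List (Int × Int) :=
  let r1 := relaxA limit c 128 (now * 2) dst []
  let s := nbr limit (c + 1) (now - 1) (nbr limit (c + 1) (now + 1) (r1.1, []))
  (s.1, r1.2, s.2)

theorem stepA_spec (limit c now : Int) (dst : List Int)
    (hc : 0 ≤ c) (hnow : 0 ≤ now ∧ now ≤ limit)
    (hnn : ∀ i, 0 ≤ i → i ≤ limit → 0 ≤ pvVal dst i)
    (hlen : dst.length = (limit + 1).toNat) :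
    (stepA limit c now dst).1.length = dst.length ∧
    (∀ i, 0 ≤ i → i ≤ limit → pvVal (stepA limit c now dst).1 i ≤ pvVal dst i) ∧
    pvVal (stepA limit c now dst).1 now = pvVal dst now ∧
    (∀ i, 0 ≤ i → i ≤ limit → 0 ≤ pvVal (stepA limit c now dst).1 i) ∧
    (∀ p ∈ (stepA limit c now dst).2.1 ++ (stepA limit c now dst).2.2,
      0 ≤ p.2 ∧ p.2 ≤ limit ∧ 0 ≤ p.1 ∧ pvVal (stepA limit c now dst).1 p.2 ≤ p.1) ∧
    (∀ u, 0 ≤ u → u ≤ limit → pvVal (stepA limit c now dst).1 u ≠ pvVal dst u →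
      (pvVal (stepA limit c now dst).1 u, u) ∈ (stepA limit c now dst).2.1 ++ (stepA limit c now dst).2.2) ∧
    (pvVal dst now = c → pvEdgesOK limit (pvVal (stepA limit c now dst).1) now) ∧
    (pvSum (stepA limit c now dst).1 + ((stepA limit c now dst).2.1 ++ (stepA limit c now dst).2.2).length
      ≤ pvSum dst) ∧
    (∀ f : Int → Int, pvStable limit f → (∀ i, 0 ≤ i → i ≤ limit → f i ≤ pvVal dst i) →
      f now ≤ c → ∀ i, 0 ≤ i → i ≤ limit → f i ≤ pvVal (stepA limit c now dst).1 i) := by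
  obtain ⟨hnow0, hnow1⟩ := hnow
  -- relax stage
  obtain ⟨R1, R2, R3, R4, R5, R6, R7, R8⟩ :=
    relaxA_spec limit c hc 128 (now * 2) dst [] (by omega) hnn hlen
  set r1 := relaxA limit c 128 (now * 2) dst [] with hr1
  have hlen1 : r1.1.length = (limit + 1).toNat := by rw [R1]; exact hlen
  have hnn1 : ∀ i, 0 ≤ i → i ≤ limit → 0 ≤ pvVal r1.1 i := R4
  have hvnow1 : pvVal r1.1 now = pvVal dst now := by
    by_cases h0 : now = 0
    · subst h0
      rw [hr1, show (0:Int) * 2 = 0 by ring, relaxA_zero]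
    · exact R3 now hnow0 (by omega)
  -- inner neighbour (now + 1)
  obtain ⟨N1a, N2a, N3a, N4a, N5a, N6a, N7a, N8a, N9a, N10a⟩ :=
    nbr_spec limit (c + 1) (now + 1) (r1.1, []) (by omega) hlen1
  set s1 := nbr limit (c + 1) (now + 1) (r1.1, []) with hs1
  have hlen2 : s1.1.length = (limit + 1).toNat := by rw [N1a]; exact hlen1
  -- outer neighbour (now - 1)
  obtain ⟨N1b, N2b, N3b, N4b, N5b, N6b, N7b, N8b, N9b, N10b⟩ :=
    nbr_spec limit (c + 1) (now - 1) s1 (by omega) hlen2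
  set s2 := nbr limit (c + 1) (now - 1) s1 with hs2
  have hstep : stepA limit c now dst = (s2.1, r1.2, s2.2) := by
    rw [stepA]
  rw [hstep]
  have hmono : ∀ i, 0 ≤ i → i ≤ limit → pvVal s2.1 i ≤ pvVal r1.1 i := by
    intro i h0 h1
    exact (N2b i h0 h1).trans (N2a i h0 h1)
  have hvnow2 : pvVal s2.1 now = pvVal dst now := by
    rw [N3b now hnow0 (by omega), N3a now hnow0 (by omega)]
    exact hvnow1
  refine ⟨?_, ?_, hvnow2, ?_, ?_, ?_, ?_, ?_, ?_⟩
  · rw [N1b, N1a, R1]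
  · intro i h0 h1
    exact (hmono i h0 h1).trans (R2 i h0 h1)
  · intro i h0 h1
    exact N9b i h0 h1 (N9a i h0 h1 (hnn1 i h0 h1))
  · intro p hp
    rcases List.mem_append.mp hp with h | h
    · rcases R6 p h with h' | ⟨hp1, hp2, hp3, hp4⟩
      · simp at h'
      · exact ⟨by omega, hp2, by omega, (hmono p.2 (by omega) hp2).trans hp4⟩
    · rcases N6b p h with h' | ⟨hpe, hb0, hb1, hbv⟩
      · rcases N6a p h' with h'' | ⟨hpe, hb0, hb1, hbv⟩
        · simp at h''
        · subst hpe
          refine ⟨hb0, hb1, by omega, ?_⟩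
          exact (N2b (now+1) hb0 hb1).trans (le_of_eq hbv)
      · subst hpe
        exact ⟨hb0, hb1, by omega, le_of_eq hbv⟩
  · intro u h0 h1 hch
    by_cases hb : pvVal s2.1 u = pvVal s1.1 u
    · by_cases ha : pvVal s1.1 u = pvVal r1.1 u
      · have hr : pvVal r1.1 u ≠ pvVal dst u := by rw [← ha, ← hb]; exact hch
        have := R7 u h0 h1 hr
        rw [← ha, ← hb] at this
        exact List.mem_append.mpr (Or.inl this)
      · rw [hb]
        exact List.mem_append.mpr (Or.inr (N5b _ (N7a u h0 ha)))
    · exact List.mem_append.mpr (Or.inr (N7b u h0 hb))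
  · intro hvc
    refine ⟨?_, ?_, ?_⟩
    · intro hne h2
      rw [hvnow2, hvc]
      have h2' : 2 * now = now * 2 := by ring
      have hfirst : pvVal r1.1 (now * 2) ≤ c := by
        have : (128 : Nat) = 127 + 1 := rfl
        rw [hr1, this]
        exact relaxA_first limit c hc 127 (now * 2) dst [] (by omega) (by omega) hnn hlen
      rw [h2']
      exact (hmono (now * 2) (by omega) (by omega)).trans hfirst
    · intro h2
      rw [hvnow2, hvc]
      have := N4a (by omega) h2
      exact (N2b (now + 1) (by omega) h2).trans this
    · intro h2
      rw [hvnow2, hvc]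
      exact N4b (by omega) (by omega)
  · have : ([] : List (Int × Int)).length = 0 := rfl
    simp only [List.length_append] at N8a N8b ⊢
    simp only [List.length_nil] at N8a R8 ⊢
    omega
  · intro f hst hf hfc i h0 h1
    have hf1 : ∀ i, 0 ≤ i → i ≤ limit → f i ≤ pvVal r1.1 i := by
      intro j j0 j1
      refine relaxA_lower limit c f hst 128 (now * 2) dst [] (by omega) hlen hf ?_ j j0 j1
      intro hge h2
      have hnz : now ≠ 0 := by omega
      have := (hst now hnow0 hnow1).1 hnz (by omega)
      calc f (now * 2) = f (2 * now) := by ring_nf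
        _ ≤ f now := this
        _ ≤ c := hfc
    have hf2 : ∀ i, 0 ≤ i → i ≤ limit → f i ≤ pvVal s1.1 i := by
      refine N10a f hf1 ?_
      intro _ h2
      exact ((hst now hnow0 hnow1).2.1 h2).trans (by omega)
    refine N10b f hf2 ?_ i h0 h1
    intro hb0 _
    exact ((hst now hnow0 hnow1).2.2 (by omega)).trans (by omega)

theorem mem_heapPush (x y : Int × Int) (l : List (Int × Int)) :
    y ∈ heapPush x l ↔ y = x ∨ y ∈ l := by
  induction l with
  | nil => simp [heapPush]
  | cons z zs ih =>
    by_cases h : x.1 < z.1 ∨ (x.1 = z.1 ∧ x.2 ≤ z.2)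
    · simp [heapPush, h]
    · simp [heapPush, h, ih]
      tauto

theorem length_heapPush (x : Int × Int) (l : List (Int × Int)) :
    (heapPush x l).length = l.length + 1 := by
  induction l with
  | nil => simp [heapPush]
  | cons z zs ih =>
    by_cases h : x.1 < z.1 ∨ (x.1 = z.1 ∧ x.2 ≤ z.2)
    · simp [heapPush, h]
    · simp [heapPush, h, ih]

theorem mem_foldl_heapPush (ps : List (Int × Int)) :
    ∀ (q : List (Int × Int)) (y : Int × Int),
    (y ∈ ps.foldl (fun h p => heapPush p h) q ↔ y ∈ ps ∨ y ∈ q) := by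
  induction ps with
  | nil => simp
  | cons x xs ih =>
    intro q y
    simp only [List.foldl_cons]
    rw [ih (heapPush x q) y, mem_heapPush]
    simp
    tauto

theorem length_foldl_heapPush (ps : List (Int × Int)) :
    ∀ (q : List (Int × Int)),
    (ps.foldl (fun h p => heapPush p h) q).length = q.length + ps.length := by
  induction ps with
  | nil => simp
  | cons x xs ih =>
    intro q
    simp only [List.foldl_cons]
    rw [ih (heapPush x q), length_heapPush]
    simp only [List.length_cons]
    omega

theorem mem_foldl_cons (ps : List (Int × Int)) :
    ∀ (q : List (Int × Int)) (y : Int × Int),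
    (y ∈ ps.foldl (fun fr p => p :: fr) q ↔ y ∈ ps ∨ y ∈ q) := by
  induction ps with
  | nil => simp
  | cons x xs ih =>
    intro q y
    simp only [List.foldl_cons]
    rw [ih (x :: q) y]
    simp
    tauto

theorem length_foldl_cons (ps : List (Int × Int)) :
    ∀ (q : List (Int × Int)),
    (ps.foldl (fun fr p => p :: fr) q).length = q.length + ps.length := by
  induction ps with
  | nil => simp
  | cons x xs ih =>
    intro q
    simp only [List.foldl_cons]
    rw [ih (x :: q)]
    simp only [List.length_cons]
    omega

def pvInv (limit sta : Int) (dst : List Int) (q : List (Int × Int)) : Prop :=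
  dst.length = (limit + 1).toNat ∧
  (∀ i, 0 ≤ i → i ≤ limit → 0 ≤ pvVal dst i ∧ pvVal dst i ≤ 10000000000) ∧
  pvVal dst sta ≤ 0 ∧
  (∀ p ∈ q, 0 ≤ p.2 ∧ p.2 ≤ limit ∧ 0 ≤ p.1 ∧ pvVal dst p.2 ≤ p.1) ∧
  (∀ u, 0 ≤ u → u ≤ limit → pvEdgesOK limit (pvVal dst) u ∨ (pvVal dst u, u) ∈ q) ∧
  (∀ f : Int → Int, pvStable limit f → f sta ≤ 0 →
    (∀ i, 0 ≤ i → i ≤ limit → f i ≤ 10000000000) →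
    ∀ i, 0 ≤ i → i ≤ limit → f i ≤ pvVal dst i)

-- the invariant is preserved by processing one popped pair (c, now), whatever pops produced it

theorem pvInv_step (limit sta c now : Int) (dst : List Int) (q rest : List (Int × Int))
    (hsta : 0 ≤ sta ∧ sta ≤ limit)
    (hInv : pvInv limit sta dst q)
    (hpop : (c, now) ∈ q)
    (hrest1 : ∀ p, p ∈ rest → p ∈ q ∨ p ∈ ((stepA limit c now dst).2.1 ++ (stepA limit c now dst).2.2))
    (hrest2 : ∀ p, p ∈ q → p ≠ (c, now) → p ∈ rest)
    (hrest3 : ∀ p, p ∈ ((stepA limit c now dst).2.1 ++ (stepA limit c now dst).2.2) → p ∈ rest)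
    (hproc : ¬ pvVal dst now < c) :
    pvInv limit sta (stepA limit c now dst).1 rest := by
  obtain ⟨hlen, hbnd, hsta0, hq, hwit, hlow⟩ := hInv
  obtain ⟨hn0, hn1, hc0, hvle⟩ := hq (c, now) hpop
  have hveq : pvVal dst now = c := le_antisymm hvle (le_of_not_gt hproc)
  have hnn : ∀ i, 0 ≤ i → i ≤ limit → 0 ≤ pvVal dst i := fun i a b => (hbnd i a b).1
  obtain ⟨S1, S2, S3, S4, S5, S6, S7, S8, S9⟩ :=
    stepA_spec limit c now dst hc0 ⟨hn0, hn1⟩ hnn hlen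
  refine ⟨by rw [S1]; exact hlen, ?_, ?_, ?_, ?_, ?_⟩
  · intro i h0 h1
    exact ⟨S4 i h0 h1, (S2 i h0 h1).trans (hbnd i h0 h1).2⟩
  · exact (S2 sta hsta.1 hsta.2).trans hsta0
  · intro p hp
    rcases hrest1 p hp with h | h
    · obtain ⟨a1, a2, a3, a4⟩ := hq p h
      exact ⟨a1, a2, a3, (S2 p.2 a1 a2).trans a4⟩
    · exact S5 p h
  · intro u h0 h1
    by_cases hch : pvVal (stepA limit c now dst).1 u = pvVal dst u
    · by_cases hun : u = now
      · subst hun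
        exact Or.inl (S7 hveq)
      · rcases hwit u h0 h1 with hok | hmem
        · left
          obtain ⟨e1, e2, e3⟩ := hok
          refine ⟨?_, ?_, ?_⟩
          · intro hne h2
            rw [hch]
            exact (S2 (2*u) (by omega) h2).trans (e1 hne h2)
          · intro h2
            rw [hch]
            exact (S2 (u+1) (by omega) h2).trans (e2 h2)
          · intro h2
            rw [hch]
            exact (S2 (u-1) (by omega) (by omega)).trans (e3 h2)
        · right
          rw [hch]
          refine hrest2 _ hmem ?_
          intro hpe
          exact hun (by simpa using congrArg Prod.snd hpe)
    · right
      exact hrest3 _ (S6 u h0 h1 hch)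
  · intro f hstf hf0 hfb i h0 h1
    have hfd := hlow f hstf hf0 hfb
    exact S9 f hstf hfd ((hfd now hn0 hn1).trans (le_of_eq hveq)) i h0 h1

theorem loopA_process (limit sumc now : Int) (fuel : Nat) (dst : List Int)
    (rest : List (Int × Int)) (h : ¬ PySem.List.pyGetD dst now 0 < sumc) :
    loopA limit (fuel+1) dst ((sumc, now) :: rest) =
    loopA limit fuel (stepA limit sumc now dst).1
      (((stepA limit sumc now dst).2.1 ++ (stepA limit sumc now dst).2.2).foldl
        (fun h p => heapPush p h) rest) := by
  simp only [loopA, if_neg h]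
  set r1 := relaxA limit sumc 128 (now * 2) dst [] with hr1
  by_cases h1 : 0 ≤ now + 1 ∧ now + 1 ≤ limit ∧ PySem.List.pyGetD r1.1 (now + 1) 0 > sumc + 1
  · by_cases h2 : 0 ≤ now - 1 ∧ now - 1 ≤ limit ∧
        PySem.List.pyGetD (PySem.List.pySetD r1.1 (now + 1) (sumc + 1)) (now - 1) 0 > sumc + 1
    · simp only [stepA, ← hr1, nbr, if_pos h1, if_pos h2]
      simp only [List.foldl_append, List.foldl_cons, List.foldl_nil, List.append_assoc]
    · simp only [stepA, ← hr1, nbr, if_pos h1, if_neg h2]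
      simp only [List.foldl_append, List.foldl_cons, List.foldl_nil, List.append_assoc]
  · by_cases h2 : 0 ≤ now - 1 ∧ now - 1 ≤ limit ∧ PySem.List.pyGetD r1.1 (now - 1) 0 > sumc + 1
    · simp only [stepA, ← hr1, nbr, if_neg h1, if_pos h2]
      simp only [List.foldl_append, List.foldl_cons, List.foldl_nil, List.append_assoc]
    · simp only [stepA, ← hr1, nbr, if_neg h1, if_neg h2]
      simp only [List.foldl_append, List.foldl_cons, List.foldl_nil, List.append_nil]

theorem loopA_run (limit sta : Int) (hsta : 0 ≤ sta ∧ sta ≤ limit) :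
    ∀ (fuel : Nat) (dst : List Int) (q : List (Int × Int)),
    pvInv limit sta dst q → 2 * pvSum dst + q.length ≤ fuel →
    pvInv limit sta (loopA limit fuel dst q) [] := by
  intro fuel
  induction fuel with
  | zero =>
    intro dst q hInv hmu
    have hq : q = [] := List.length_eq_zero_iff.mp (by omega)
    subst hq
    exact ⟨hInv.1, hInv.2.1, hInv.2.2.1, by simp, hInv.2.2.2.2.1, hInv.2.2.2.2.2⟩
  | succ n ih =>
    intro dst q hInv hmu
    match q with
    | [] =>
      exact ⟨hInv.1, hInv.2.1, hInv.2.2.1, by simp, hInv.2.2.2.2.1, hInv.2.2.2.2.2⟩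
    | (c, now) :: rest =>
      obtain ⟨hlen, hbnd, hsta0, hq, hwit, hlow⟩ := hInv
      by_cases hskip : PySem.List.pyGetD dst now 0 < c
      · have heq : loopA limit (n+1) dst ((c, now) :: rest) = loopA limit n dst rest := by
          simp [loopA, hskip]
        rw [heq]
        refine ih dst rest ⟨hlen, hbnd, hsta0, ?_, ?_, hlow⟩ (by simp at hmu ⊢; omega)
        · intro p hp; exact hq p (List.mem_cons_of_mem _ hp)
        · intro u h0 h1
          rcases hwit u h0 h1 with hok | hmem
          · exact Or.inl hok
          · rcases List.mem_cons.mp hmem with hpe | hmem'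
            · exfalso
              have h3 : u = now := congrArg Prod.snd hpe
              have h2 : pvVal dst now = c := by rw [← h3]; exact congrArg Prod.fst hpe
              have h4 : pvVal dst now < c := hskip
              omega
            · exact Or.inr hmem'
      · rw [loopA_process limit c now n dst rest hskip]
        have hpopq : (c, now) ∈ (c, now) :: rest := List.mem_cons_self ..
        set ps := (stepA limit c now dst).2.1 ++ (stepA limit c now dst).2.2 with hps
        set rest' := ps.foldl (fun h p => heapPush p h) rest with hrest'
        have hInv' : pvInv limit sta (stepA limit c now dst).1 rest' := by
          refine pvInv_step limit sta c now dst ((c, now) :: rest) rest' hsta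
            ⟨hlen, hbnd, hsta0, hq, hwit, hlow⟩ hpopq ?_ ?_ ?_ hskip
          · intro p hp
            rcases (mem_foldl_heapPush ps rest p).mp hp with h | h
            · exact Or.inr h
            · exact Or.inl (List.mem_cons_of_mem _ h)
          · intro p hp hne
            rcases List.mem_cons.mp hp with hpe | hmem
            · exact absurd hpe hne
            · exact (mem_foldl_heapPush ps rest p).mpr (Or.inr hmem)
          · intro p hp
            exact (mem_foldl_heapPush ps rest p).mpr (Or.inl hp)
        refine ih _ _ hInv' ?_
        have hl : rest'.length = rest.length + ps.length := length_foldl_heapPush ps rest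
        have hS8 : pvSum (stepA limit c now dst).1 + ps.length ≤ pvSum dst := by
          have hnn : ∀ i, 0 ≤ i → i ≤ limit → 0 ≤ pvVal dst i := fun i a b => (hbnd i a b).1
          obtain ⟨a1, a2, a3, a4⟩ := hq (c, now) hpopq
          exact (stepA_spec limit c now dst a3 ⟨a1, a2⟩ hnn hlen).2.2.2.2.2.2.2.1
        simp only [List.length_cons] at hmu
        omega

theorem relaxA_append (limit sumc : Int) :
    ∀ (fuel : Nat) (a : Int) (dst : List Int) (ps : List (Int × Int)),
    relaxA limit sumc fuel a dst ps =
      ((relaxA limit sumc fuel a dst []).1, ps ++ (relaxA limit sumc fuel a dst []).2) := by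
  intro fuel
  induction fuel with
  | zero => intro a dst ps; simp [relaxA]
  | succ n ih =>
    intro a dst ps
    simp only [relaxA]
    split_ifs with h1 h2
    · rw [ih (a*2) _ (ps ++ [(sumc, a)]), ih (a*2) _ ([] ++ [(sumc, a)])]
      simp
    · rw [ih (a*2) dst ps, ih (a*2) dst ([] : List (Int × Int))]
    · simp

theorem relaxB_eq (limit sumc : Int) :
    ∀ (fuel : Nat) (a : Int) (dst : List Int) (front : List (Int × Int)),
    relaxB limit sumc fuel a dst front =
      ((relaxA limit sumc fuel a dst []).1,
       (relaxA limit sumc fuel a dst []).2.foldl (fun fr p => p :: fr) front) := by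
  intro fuel
  induction fuel with
  | zero => intro a dst front; simp [relaxA, relaxB]
  | succ n ih =>
    intro a dst front
    simp only [relaxA, relaxB]
    split_ifs with h1 h2
    · rw [ih (a*2) _ ((sumc, a) :: front),
        relaxA_append limit sumc n (a*2) (PySem.List.pySetD dst a sumc) ([] ++ [(sumc, a)])]
      simp
    · rw [ih (a*2) dst front]
    · simp

theorem loopB_process (limit sumc now : Int) (fuel : Nat) (dst : List Int)
    (fs bk : List (Int × Int)) (h : ¬ PySem.List.pyGetD dst now 0 < sumc) :
    (if PySem.List.pyGetD dst now 0 < sumc then loopB limit fuel dst fs bk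
     else
       let r1 := relaxB limit sumc 128 (now * 2) dst fs
       let r2 := [now + 1, now - 1].foldl
           (fun (st : List Int × List (Int × Int)) b =>
             if 0 ≤ b ∧ b ≤ limit ∧ PySem.List.pyGetD st.1 b 0 > sumc + 1
             then (PySem.List.pySetD st.1 b (sumc + 1), st.2 ++ [(sumc + 1, b)])
             else st) (r1.1, [])
       loopB limit fuel r2.1 r1.2 (bk ++ r2.2)) =
    loopB limit fuel (stepA limit sumc now dst).1
      ((stepA limit sumc now dst).2.1.foldl (fun fr p => p :: fr) fs)
      (bk ++ (stepA limit sumc now dst).2.2) := by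
  rw [if_neg h]
  show loopB limit fuel
      (nbr limit (sumc + 1) (now - 1) (nbr limit (sumc + 1) (now + 1)
        ((relaxB limit sumc 128 (now * 2) dst fs).1, []))).1
      (relaxB limit sumc 128 (now * 2) dst fs).2
      (bk ++ (nbr limit (sumc + 1) (now - 1) (nbr limit (sumc + 1) (now + 1)
        ((relaxB limit sumc 128 (now * 2) dst fs).1, []))).2) = _
  rw [relaxB_eq]
  rfl

theorem loopB_run (limit sta : Int) (hsta : 0 ≤ sta ∧ sta ≤ limit) :
    ∀ (fuel : Nat) (dst : List Int) (front back : List (Int × Int)),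
    pvInv limit sta dst (front ++ back) →
    2 * pvSum dst + (front ++ back).length ≤ fuel →
    pvInv limit sta (loopB limit fuel dst front back) [] := by
  intro fuel
  induction fuel with
  | zero =>
    intro dst front back hInv hmu
    have hq : front ++ back = [] := List.length_eq_zero_iff.mp (by omega)
    rw [hq] at hInv
    exact ⟨hInv.1, hInv.2.1, hInv.2.2.1, by simp, hInv.2.2.2.2.1, hInv.2.2.2.2.2⟩
  | succ n ih =>
    intro dst front back hInv hmu
    have hstep : ∀ (c now : Int) (fs bk : List (Int × Int)),
        pvInv limit sta dst ((c, now) :: (fs ++ bk)) →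
        2 * pvSum dst + ((c, now) :: (fs ++ bk)).length ≤ n + 1 →
        pvInv limit sta
          (if PySem.List.pyGetD dst now 0 < c then loopB limit n dst fs bk
           else
             let r1 := relaxB limit c 128 (now * 2) dst fs
             let r2 := [now + 1, now - 1].foldl
                 (fun (st : List Int × List (Int × Int)) b =>
                   if 0 ≤ b ∧ b ≤ limit ∧ PySem.List.pyGetD st.1 b 0 > c + 1
                   then (PySem.List.pySetD st.1 b (c + 1), st.2 ++ [(c + 1, b)])
                   else st) (r1.1, [])
             loopB limit n r2.1 r1.2 (bk ++ r2.2)) [] := by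
      intro c now fs bk hInv' hmu'
      obtain ⟨hlen, hbnd, hsta0, hq, hwit, hlow⟩ := hInv'
      by_cases hskip : PySem.List.pyGetD dst now 0 < c
      · rw [if_pos hskip]
        refine ih dst fs bk ⟨hlen, hbnd, hsta0, ?_, ?_, hlow⟩ (by simp at hmu' ⊢; omega)
        · intro p hp; exact hq p (List.mem_cons_of_mem _ hp)
        · intro u h0 h1
          rcases hwit u h0 h1 with hok | hmem
          · exact Or.inl hok
          · rcases List.mem_cons.mp hmem with hpe | hmem'
            · exfalso
              have h3 : u = now := congrArg Prod.snd hpe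
              have h2 : pvVal dst now = c := by rw [← h3]; exact congrArg Prod.fst hpe
              have h4 : pvVal dst now < c := hskip
              omega
            · exact Or.inr hmem'
      · rw [loopB_process limit c now n dst fs bk hskip]
        have hpopq : (c, now) ∈ (c, now) :: (fs ++ bk) := List.mem_cons_self ..
        set zs := (stepA limit c now dst).2.1 with hzs
        set os := (stepA limit c now dst).2.2 with hos
        set front' := zs.foldl (fun fr p => p :: fr) fs with hfront'
        set back' := bk ++ os with hback'
        have hInv'' : pvInv limit sta (stepA limit c now dst).1 (front' ++ back') := by
          refine pvInv_step limit sta c now dst ((c, now) :: (fs ++ bk)) (front' ++ back') hsta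
            ⟨hlen, hbnd, hsta0, hq, hwit, hlow⟩ hpopq ?_ ?_ ?_ hskip
          · intro p hp
            rcases List.mem_append.mp hp with h | h
            · rcases (mem_foldl_cons zs fs p).mp h with h' | h'
              · exact Or.inr (List.mem_append.mpr (Or.inl h'))
              · exact Or.inl (List.mem_cons_of_mem _ (List.mem_append.mpr (Or.inl h')))
            · rcases List.mem_append.mp h with h' | h'
              · exact Or.inl (List.mem_cons_of_mem _ (List.mem_append.mpr (Or.inr h')))
              · exact Or.inr (List.mem_append.mpr (Or.inr h'))
          · intro p hp hne
            rcases List.mem_cons.mp hp with hpe | hmem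
            · exact absurd hpe hne
            · rcases List.mem_append.mp hmem with h | h
              · exact List.mem_append.mpr (Or.inl ((mem_foldl_cons zs fs p).mpr (Or.inr h)))
              · exact List.mem_append.mpr (Or.inr (List.mem_append.mpr (Or.inl h)))
          · intro p hp
            rcases List.mem_append.mp hp with h | h
            · exact List.mem_append.mpr (Or.inl ((mem_foldl_cons zs fs p).mpr (Or.inl h)))
            · exact List.mem_append.mpr (Or.inr (List.mem_append.mpr (Or.inr h)))
        refine ih _ _ _ hInv'' ?_
        have hl1 : front'.length = fs.length + zs.length := length_foldl_cons zs fs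
        have hS8 : pvSum (stepA limit c now dst).1 + (zs ++ os).length ≤ pvSum dst := by
          have hnn : ∀ i, 0 ≤ i → i ≤ limit → 0 ≤ pvVal dst i := fun i a b => (hbnd i a b).1
          obtain ⟨a1, a2, a3, a4⟩ := hq (c, now) hpopq
          exact (stepA_spec limit c now dst a3 ⟨a1, a2⟩ hnn hlen).2.2.2.2.2.2.2.1
        have hl2 : back'.length = bk.length + os.length := by
          rw [hback', List.length_append]
        simp only [List.length_cons, List.length_append] at hmu' hS8 ⊢
        omega
    match front with
    | [] =>
      match back with
      | [] =>
        show pvInv limit sta dst []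
        exact ⟨hInv.1, hInv.2.1, hInv.2.2.1, by simp, by simpa using hInv.2.2.2.2.1,
          hInv.2.2.2.2.2⟩
      | (c, now) :: bs =>
        have hred : loopB limit (n+1) dst [] ((c, now) :: bs) =
            (if PySem.List.pyGetD dst now 0 < c then loopB limit n dst bs []
             else
               let r1 := relaxB limit c 128 (now * 2) dst bs
               let r2 := [now + 1, now - 1].foldl
                   (fun (st : List Int × List (Int × Int)) b =>
                     if 0 ≤ b ∧ b ≤ limit ∧ PySem.List.pyGetD st.1 b 0 > c + 1
                     then (PySem.List.pySetD st.1 b (c + 1), st.2 ++ [(c + 1, b)])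
                     else st) (r1.1, [])
               loopB limit n r2.1 r1.2 ([] ++ r2.2)) := rfl
        rw [hred]
        have h1 : pvInv limit sta dst ((c, now) :: (bs ++ [])) := by simpa using hInv
        have h2 : 2 * pvSum dst + ((c, now) :: (bs ++ [])).length ≤ n + 1 := by
          simp at hmu ⊢; omega
        have := hstep c now bs [] h1 h2
        simpa using this
    | (c, now) :: fs =>
      have hred : loopB limit (n+1) dst ((c, now) :: fs) back =
          (if PySem.List.pyGetD dst now 0 < c then loopB limit n dst fs back
           else
             let r1 := relaxB limit c 128 (now * 2) dst fs
             let r2 := [now + 1, now - 1].foldl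
                 (fun (st : List Int × List (Int × Int)) b =>
                   if 0 ≤ b ∧ b ≤ limit ∧ PySem.List.pyGetD st.1 b 0 > c + 1
                   then (PySem.List.pySetD st.1 b (c + 1), st.2 ++ [(c + 1, b)])
                   else st) (r1.1, [])
             loopB limit n r2.1 r1.2 (back ++ r2.2)) := rfl
      rw [hred]
      exact hstep c now fs back (by simpa using hInv) (by simp at hmu ⊢; omega)

theorem pvVal_replicate (N : Nat) (x : Int) (i : Int) (h0 : 0 ≤ i) (h1 : i < (N : Int)) :
    pvVal (List.replicate N x) i = x := by
  rw [pvVal_eq_getD _ _ h0]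
  have : i.toNat < N := by omega
  simp [List.getD, this]

theorem pvSum_replicate (N : Nat) (x : Int) : pvSum (List.replicate N x) = N * x.toNat := by
  simp [pvSum, List.map_replicate, List.sum_replicate, smul_eq_mul]

theorem init_inv (limit sta : Int) (h : 0 ≤ sta ∧ sta ≤ limit) :
    pvInv limit sta
      (PySem.List.pySetD (List.replicate (limit + 1).toNat (10000000000 : Int)) sta 0)
      [((0 : Int), sta)] := by
  obtain ⟨h0, h1⟩ := h
  have hlenr : (List.replicate (limit + 1).toNat (10000000000 : Int)).length = (limit + 1).toNat := by
    simp
  have hrange : sta < ((List.replicate (limit + 1).toNat (10000000000 : Int)).length : Int) := by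
    rw [hlenr]; omega
  set dst1 := PySem.List.pySetD (List.replicate (limit + 1).toNat (10000000000 : Int)) sta 0
    with hdst1
  have hself : pvVal dst1 sta = 0 := pvVal_set_self _ sta 0 h0 hrange
  have hother : ∀ i, 0 ≤ i → i ≤ limit → i ≠ sta → pvVal dst1 i = 10000000000 := by
    intro i hi0 hi1 hne
    rw [hdst1, pvVal_set_other _ sta 0 i hi0 h0 hne, pvVal_replicate _ _ i hi0 (by omega)]
  have hval : ∀ i, 0 ≤ i → i ≤ limit → pvVal dst1 i = 0 ∨ pvVal dst1 i = 10000000000 := by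
    intro i hi0 hi1
    by_cases hie : i = sta
    · subst hie; exact Or.inl hself
    · exact Or.inr (hother i hi0 hi1 hie)
  have hbnd : ∀ i, 0 ≤ i → i ≤ limit → 0 ≤ pvVal dst1 i ∧ pvVal dst1 i ≤ 10000000000 := by
    intro i hi0 hi1
    rcases hval i hi0 hi1 with hv | hv <;> rw [hv] <;> omega
  refine ⟨by rw [hdst1, PySem.List.length_pySetD, hlenr], hbnd, le_of_eq hself, ?_, ?_, ?_⟩
  · intro p hp
    have hpe : p = ((0 : Int), sta) := by simpa using hp
    subst hpe
    exact ⟨h0, h1, le_refl _, le_of_eq hself⟩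
  · intro u hu0 hu1
    by_cases hue : u = sta
    · subst hue
      right
      rw [hself]
      simp
    · left
      have hu : pvVal dst1 u = 10000000000 := hother u hu0 hu1 hue
      refine ⟨?_, ?_, ?_⟩
      · intro _ h2
        rw [hu]
        exact ((hbnd (2*u) (by omega) h2).2)
      · intro h2
        rw [hu]
        have := (hbnd (u+1) (by omega) h2).2
        omega
      · intro h2
        rw [hu]
        have := (hbnd (u-1) (by omega) (by omega)).2
        omega
  · intro f _ hf0 hfb i hi0 hi1
    by_cases hie : i = sta
    · subst hie; rw [hself]; exact hf0
    · rw [hother i hi0 hi1 hie]; exact hfb i hi0 hi1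

theorem pvSum_init (limit sta : Int) (h0 : 0 ≤ sta) (h1 : sta ≤ limit) :
    pvSum (PySem.List.pySetD (List.replicate (limit + 1).toNat (10000000000 : Int)) sta 0)
      ≤ (limit + 1).toNat * 10000000000 := by
  rw [PySem.List.pySetD_of_nonneg _ _ h0]
  have hlt : sta.toNat < (limit + 1).toNat := by omega
  have := pvSum_set_aux (List.replicate (limit + 1).toNat (10000000000 : Int)) sta.toNat 0
    (by simpa using hlt)
  rw [pvSum_replicate] at this
  have h10 : ((10000000000 : Int)).toNat = 10000000000 := rfl
  rw [h10] at this
  omega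

theorem dists_agree (limit sta : Int)
    (dA dB : List Int)
    (hA : pvInv limit sta dA [])
    (hB : pvInv limit sta dB [])
    (i : Int) (hi0 : 0 ≤ i) (hi1 : i ≤ limit) :
    pvVal dA i = pvVal dB i := by
  obtain ⟨_, bndA, staA, _, witA, lowA⟩ := hA
  obtain ⟨_, bndB, staB, _, witB, lowB⟩ := hB
  have stA : pvStable limit (pvVal dA) := by
    intro u h0 h1
    rcases witA u h0 h1 with hok | hmem
    · exact hok
    · simp at hmem
  have stB : pvStable limit (pvVal dB) := by
    intro u h0 h1
    rcases witB u h0 h1 with hok | hmem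
    · exact hok
    · simp at hmem
  have hAB := lowB (pvVal dA) stA staA (fun j hj0 hj1 => (bndA j hj0 hj1).2) i hi0 hi1
  have hBA := lowA (pvVal dB) stB staB (fun j hj0 hj1 => (bndB j hj0 hj1).2) i hi0 hi1
  omega

theorem dij_agree (sta end_ : Int) (hpre : 0 ≤ sta ∧ sta ≤ 2 * end_) :
    dij sta end_ = dij_alt sta end_ := by
  have hend : 0 ≤ end_ := by omega
  have hsta : 0 ≤ sta ∧ sta ≤ end_ * 2 := by omega
  set limit := end_ * 2 with hlimit
  set dst1 := PySem.List.pySetD (List.replicate (limit + 1).toNat (10000000000 : Int)) sta 0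
    with hdst1
  set fuel := (2 * 10000000000 * (limit + 1) + 1).toNat with hfuel
  have hinit := init_inv limit sta hsta
  have hmu : 2 * pvSum dst1 + ([((0 : Int), sta)] : List (Int × Int)).length ≤ fuel := by
    have hs := pvSum_init limit sta hsta.1 hsta.2
    have hN : (((limit + 1).toNat : Nat) : Int) = limit + 1 := by omega
    have hcast : (((limit + 1).toNat * 10000000000 : Nat) : Int) = (limit + 1) * 10000000000 := by
      push_cast
      omega
    have hfule : (fuel : Int) = 2 * 10000000000 * (limit + 1) + 1 := by
      rw [hfuel]
      have : (0 : Int) ≤ 2 * 10000000000 * (limit + 1) + 1 := by nlinarith [hend]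
      omega
    have hsI : (pvSum dst1 : Int) ≤ (limit + 1) * 10000000000 := by
      calc (pvSum dst1 : Int) ≤ (((limit + 1).toNat * 10000000000 : Nat) : Int) := by
            exact_mod_cast hs
        _ = (limit + 1) * 10000000000 := hcast
    have : ((2 * pvSum dst1 + 1 : Nat) : Int) ≤ (fuel : Int) := by
      rw [hfule]
      push_cast
      omega
    simp only [List.length_cons, List.length_nil]
    exact_mod_cast this
  have hA := loopA_run limit sta hsta fuel dst1 [((0 : Int), sta)] hinit hmu
  have hB := loopB_run limit sta hsta fuel dst1 [] [((0 : Int), sta)] (by simpa using hinit)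
    (by simpa using hmu)
  have := dists_agree limit sta _ _ hA hB end_ hend (by omega)
  exact this

-- ===== VERDICT (by name: the statement is the Claim_ definition above) =====
theorem dij_spec : Claim_equal_dij := by
  intro sta end_ _ hpre
  show dij sta end_ = dij_alt sta end_
  exact dij_agree sta end_ hpre
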